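-- pv_equiv track=rewrite | github.com/pypi-data/pypi-mirror-364 | packages/natf/natf-3.7.0-py3-none-any.whl/natf/utils.py | proper_str_list_of_ints
-- ===== SOURCE A (Python) =====
-- def proper_str_list_of_ints(l):
--     """
--     Proper print string of list of ints.
--
--     Parameters:
--     -----------
--     l : list of ints
--         The list of ints to be print
--
--     Return:
--     -------
--     s : str
--         The print string
--     """
--     s = ''
--     sub_l = consecutive_split(l)
--     for i, sl in enumerate(sub_l):
--         if len(sl) == 1:
--             s = f"{s} {sl[0]}"
--         else:
--             s = f"{s} {sl[0]}~{sl[-1]}"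
--     return s.strip()
--
-- def check_consecutive(l):
--     """
--     Check whether a list of ints is consecutive.
--     """
--     if len(l) == 0:
--         return True
--     return sorted(l) == list(range(min(l), max(l)+1))
--
-- def find_non_consecutive(l):
--     """
--     Find the index of the first non consecutive in int list
--
--     Parameters:
--     -----------
--     l : list
--         The sorted list of integers
--     """
--     shift = l[0]
--     for i, item in enumerate(l):
--         if item - i > shift:
--             return i
--
-- def consecutive_split(l):
--     """
--     Split a list of int into consecutive sub-lists
--
--     Parameters:
--     -----------
--     l : list
--         The list of integers
--
--     Returns:
--     --------
--     sub_l : list of list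
--         The list of sub-lists
--     """
--     if l == []:
--         return l
--     l = sorted(l)
--     if check_consecutive(l):
--         return [l]
--     res_l = l
--     sub_l = []
--     while not check_consecutive(res_l):
--         idx = find_non_consecutive(res_l)
--         sub_l.append(res_l[0:idx])
--         res_l = res_l[idx:]
--     if res_l:
--         sub_l.append(res_l)
--     return sub_l
-- ===== SOURCE B (Python) =====
-- def proper_str_list_of_ints(l):
--     """Proper print string of list of ints: sort once, then one linear pass
--     grouping consecutive runs (A re-scans with sorted/min/max per split)."""
--     parts = []
--     start = prev = None
--     for x in sorted(l):
--         if start is None: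
--             start = prev = x
--         elif x == prev + 1:
--             prev = x
--         else:
--             parts.append(str(start) if start == prev else f"{start}~{prev}")
--             start = prev = x
--     if start is not None:
--         parts.append(str(start) if start == prev else f"{start}~{prev}")
--     return ' '.join(parts)
-- ===== Notes on version B (the rewrite author's own statement) =====
-- stated objective: faster
-- what changed: A repeatedly re-sorts and re-scans the residual list (check_consecutive calls sorted/min/max inside a while loop that peels one run per iteration); B sorts once and emits all consecutive runs in a single linear pass with a start/prev accumulator.
-- outside the precondition, e.g. on proper_str_list_of_ints([1, 1, 5]): A returns '1~1 5', B returns '1 1 5'; on proper_str_list_of_ints([1, 1, 2]): A does not finish within the time limit, B returns '1 1~2'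
import Mathlib
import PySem

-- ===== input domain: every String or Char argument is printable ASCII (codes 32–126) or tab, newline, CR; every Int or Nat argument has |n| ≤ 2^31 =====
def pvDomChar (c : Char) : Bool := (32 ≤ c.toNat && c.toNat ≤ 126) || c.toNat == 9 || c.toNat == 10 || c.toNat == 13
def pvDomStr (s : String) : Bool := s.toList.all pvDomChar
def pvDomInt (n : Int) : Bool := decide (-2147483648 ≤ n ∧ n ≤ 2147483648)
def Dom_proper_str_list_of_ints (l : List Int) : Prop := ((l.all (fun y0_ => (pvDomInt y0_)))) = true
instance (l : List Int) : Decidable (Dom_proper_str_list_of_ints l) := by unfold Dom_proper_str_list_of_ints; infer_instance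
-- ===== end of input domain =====

-- B replaces A's repeated re-sort/re-scan run splitting with one sort and a single
-- linear grouping pass (O(n log n) work instead of A's quadratic splitting).
-- Strings are ported as List Char via PySem.Chars/PySem.Int.toChars + String.mk.

-- ===== PORT A =====

-- check_consecutive(l): len==0 or sorted(l) == list(range(min(l), max(l)+1))
def pvCheckConsecutive (l : List Int) : Bool :=
  if l.length = 0 then true
  else
    match PySem.List.min? l (fun x => x), PySem.List.max? l (fun x => x) with
    | some mn, some mx =>
        PySem.List.sorted l (fun x => x) false == PySem.List.pyRange mn (mx + 1) 1
    | _, _ => false   -- unreachable: l is nonempty, so min?/max? are some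

-- the 'for i, item in enumerate(l)' loop of find_non_consecutive
def pvFncLoop (shift : Int) : List Int → Nat → Option Nat
  | [], _ => none                    -- loop falls through: Python returns None
  | x :: xs, i => if x - (i : Int) > shift then some i else pvFncLoop shift xs (i + 1)

-- find_non_consecutive(l); A only calls it with nonempty l ([] would raise IndexError)
def pvFindNonConsecutive (l : List Int) : Option Nat :=
  match l with
  | [] => none
  | x :: _ => pvFncLoop x l 0

-- the while loop of consecutive_split; fuel l.length+1 suffices because each
-- iteration drops at least one element (idx ≥ 1); fuel only makes it total.
def pvCsLoop : Nat → List Int → List (List Int) → List (List Int)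
  | 0, res, sub => sub   -- fuel exhausted: unreachable (fuel > res.length is invariant)
  | fuel + 1, res, sub =>
      if pvCheckConsecutive res then
        (if res ≠ [] then sub ++ [res] else sub)   -- 'if res_l: sub_l.append(res_l)'
      else
        match pvFindNonConsecutive res with
        | none => sub ++ [res]   -- Python loops forever here (res_l[None:] = res_l); outside Pre_
        | some idx => pvCsLoop fuel (res.drop idx) (sub ++ [res.take idx])
          -- res_l[0:idx] / res_l[idx:] with idx a nonnegative enumerate index
          -- (= PySem.List.slice by slice_natCast / slice_from_natCast)

def pvConsecutiveSplit (l : List Int) : List (List Int) :=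
  if l = [] then []
  else
    let ls := PySem.List.sorted l (fun x => x) false
    if pvCheckConsecutive ls then [ls]
    else pvCsLoop (ls.length + 1) ls []

def proper_str_list_of_ints (l : List Int) : String :=
  let sub_l := pvConsecutiveSplit l
  -- the enumerate index i is unused, so fold directly over sub_l
  let s := sub_l.foldl (fun s sl =>
    if sl.length = 1 then
      s ++ ' ' :: PySem.Int.toChars (PySem.List.pyGetD sl 0 0)
    else
      s ++ ' ' :: PySem.Int.toChars (PySem.List.pyGetD sl 0 0)
        ++ '~' :: PySem.Int.toChars (PySem.List.pyGetD sl (-1) 0)) []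
  String.mk (PySem.Chars.strip s)

-- ===== PORT B =====

-- str(start) if start == prev else f"{start}~{prev}"
def pvFmtRun (s p : Int) : List Char :=
  if s = p then PySem.Int.toChars s
  else PySem.Int.toChars s ++ '~' :: PySem.Int.toChars p

-- one step of B's grouping loop; state = (parts, Option (start, prev))
def pvStepB (st : List (List Char) × Option (Int × Int)) (x : Int) :
    List (List Char) × Option (Int × Int) :=
  match st.2 with
  | none => (st.1, some (x, x))
  | some (s, p) =>
      if x = p + 1 then (st.1, some (s, x))
      else (st.1 ++ [pvFmtRun s p], some (x, x))

def proper_str_list_of_ints_alt (l : List Int) : String :=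
  let st := (PySem.List.sorted l (fun x => x) false).foldl pvStepB ([], none)
  let parts :=
    match st.2 with
    | none => st.1
    | some (s, p) => st.1 ++ [pvFmtRun s p]   -- final flush
  String.mk (PySem.Chars.join [' '] parts)

-- ===== PRECONDITION & SPEC =====
-- Pre_ excludes lists with duplicate elements: on those A's while loop either never
-- terminates (find_non_consecutive returns None and the residual list never shrinks,
-- e.g. [1,1,2]) or returns an accidental run string counting a duplicate as a run
-- (e.g. '1~1 5' for [1,1,5]); B formats duplicates naturally.
def Pre_proper_str_list_of_ints (l : List Int) : Prop := l.Nodup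
instance (l : List Int) : Decidable (Pre_proper_str_list_of_ints l) := by unfold Pre_proper_str_list_of_ints; infer_instance

def pvWitness_proper_str_list_of_ints : List Int := [3, 1, 2, 9, 7]

def Spec_proper_str_list_of_ints (l : List Int) (out : String) : Prop := out = proper_str_list_of_ints_alt l
instance (l : List Int) (out : String) : Decidable (Spec_proper_str_list_of_ints l out) := by unfold Spec_proper_str_list_of_ints; infer_instance

-- ===== CLAIM (what is proved, stated in full; the proofs are below) =====
def Claim_equal_proper_str_list_of_ints : Prop := ∀ (l : List Int), Dom_proper_str_list_of_ints l → Pre_proper_str_list_of_ints l → Spec_proper_str_list_of_ints l (proper_str_list_of_ints l)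

-- ===== LEMMAS AND PROOFS =====

-- the maximal leading consecutive chain after an element p, and the rest
def pvTakeChain (p : Int) : List Int → List Int
  | [] => []
  | x :: xs => if x = p + 1 then x :: pvTakeChain x xs else []

def pvDropChain (p : Int) : List Int → List Int
  | [] => []
  | x :: xs => if x = p + 1 then pvDropChain x xs else x :: xs

-- last element of the run starting at p
def pvRunEnd (p : Int) : List Int → Int
  | [] => p
  | x :: xs => if x = p + 1 then pvRunEnd x xs else p

theorem pvDropChain_length_le (p : Int) (l : List Int) : (pvDropChain p l).length ≤ l.length := by
  induction l generalizing p with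
  | nil => simp [pvDropChain]
  | cons x xs ih =>
    simp only [pvDropChain]
    split
    · exact Nat.le_succ_of_le (ih x)
    · simp

-- the runs of xs, as sub-lists (what consecutive_split computes on a nodup sorted list)
def pvBlocks : List Int → List (List Int)
  | [] => []
  | x :: rest => (x :: pvTakeChain x rest) :: pvBlocks (pvDropChain x rest)
termination_by l => l.length
decreasing_by simpa using Nat.lt_succ_of_le (pvDropChain_length_le x rest)

-- the runs of xs, formatted (what B's pass computes)
def pvFmtBlocks : List Int → List (List Char)
  | [] => []
  | x :: rest => pvFmtRun x (pvRunEnd x rest) :: pvFmtBlocks (pvDropChain x rest)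
termination_by l => l.length
decreasing_by simpa using Nat.lt_succ_of_le (pvDropChain_length_le x rest)

theorem pvSplitChain (p : Int) (l : List Int) : pvTakeChain p l ++ pvDropChain p l = l := by
  induction l generalizing p with
  | nil => simp [pvTakeChain, pvDropChain]
  | cons x xs ih =>
    simp only [pvTakeChain, pvDropChain]
    split
    · simpa using ih x
    · simp

theorem pvRunEnd_ge (p : Int) (l : List Int) : p ≤ pvRunEnd p l := by
  induction l generalizing p with
  | nil => simp [pvRunEnd]
  | cons x xs ih =>
    simp only [pvRunEnd]
    split
    · exact le_trans (by omega) (ih x)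
    · exact le_refl p

theorem pvRunEnd_eq_iff (p : Int) (l : List Int) : pvRunEnd p l = p ↔ pvTakeChain p l = [] := by
  cases l with
  | nil => simp [pvRunEnd, pvTakeChain]
  | cons x xs =>
    simp only [pvRunEnd, pvTakeChain]
    split
    · rename_i hx
      constructor
      · intro h
        exfalso
        have := pvRunEnd_ge x xs
        omega
      · intro h; simp at h
    · simp

theorem pvBlock_getLast? (p : Int) (l : List Int) :
    (p :: pvTakeChain p l).getLast? = some (pvRunEnd p l) := by
  induction l generalizing p with
  | nil => simp [pvTakeChain, pvRunEnd]
  | cons x xs ih =>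
    simp only [pvTakeChain, pvRunEnd]
    split
    · simpa [List.getLast?_cons_cons] using ih x
    · simp

theorem pvTake_run (x : Int) (rest : List Int) :
    (x :: rest).take (1 + (pvTakeChain x rest).length) = x :: pvTakeChain x rest := by
  have h := pvSplitChain x rest
  generalize ht : pvTakeChain x rest = t at h ⊢
  generalize hd : pvDropChain x rest = d at h
  rw [← h, Nat.add_comm, List.take_succ_cons, List.take_left]

theorem pvDrop_run (x : Int) (rest : List Int) :
    (x :: rest).drop (1 + (pvTakeChain x rest).length) = pvDropChain x rest := by
  have h := pvSplitChain x rest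
  generalize ht : pvTakeChain x rest = t at h ⊢
  generalize hd : pvDropChain x rest = d at h ⊢
  rw [← h, Nat.add_comm, List.drop_succ_cons, List.drop_left]

theorem pvDropChain_nil_of_take_all (x : Int) (rest : List Int)
    (h : pvTakeChain x rest = rest) : pvDropChain x rest = [] := by
  have hs := pvSplitChain x rest
  rw [h] at hs
  have := congrArg List.length hs
  simp at this
  exact this

-- ---- chains, ranges and check_consecutive on strictly increasing lists ----

theorem pvChainTaken (x : Int) (rest : List Int) :
    pvTakeChain x rest = rest ↔ (x :: rest).IsChain (fun a b => b = a + 1) := by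
  induction rest generalizing x with
  | nil => simp [pvTakeChain]
  | cons y ys ih =>
    simp only [pvTakeChain, List.isChain_cons_cons]
    by_cases hy : y = x + 1
    · rw [if_pos hy]
      constructor
      · intro he
        exact ⟨hy, (ih y).1 (by injection he)⟩
      · intro ⟨_, hc⟩
        rw [(ih y).2 hc]
    · rw [if_neg hy]
      constructor
      · intro he; exact absurd he (by simp)
      · intro ⟨h1, _⟩; exact absurd h1 hy

theorem pvChain_last_ge (y : Int) (ys : List Int)
    (hc : (y :: ys).IsChain (fun a b => b = a + 1)) :
    y ≤ (y :: ys).getLast (by simp) := by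
  induction ys generalizing y with
  | nil => simp
  | cons z zs ih =>
    rw [List.isChain_cons_cons] at hc
    have := ih z hc.2
    calc y ≤ z := by omega
    _ ≤ _ := by simpa [List.getLast_cons] using this

theorem pvChain_range (x : Int) (rest : List Int)
    (hc : (x :: rest).IsChain (fun a b => b = a + 1)) :
    x :: rest = PySem.List.pyRange x ((x :: rest).getLast (by simp) + 1) 1 := by
  induction rest generalizing x with
  | nil => simp [PySem.List.pyRange_one_singleton]
  | cons y ys ih =>
    rw [List.isChain_cons_cons] at hc
    obtain ⟨hy, hc'⟩ := hc
    have hrec := ih y hc'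
    have hlast : (x :: y :: ys).getLast (by simp) = (y :: ys).getLast (by simp) := by
      simp [List.getLast_cons]
    rw [hlast]
    have hxl : x < (y :: ys).getLast (by simp) + 1 := by
      have := pvChain_last_ge y ys hc'
      omega
    rw [PySem.List.pyRange_one_cons hxl, ← hy, ← hrec]

theorem pvRange_chain (a b : Int) :
    (PySem.List.pyRange a b 1).IsChain (fun u v => v = u + 1) := by
  by_cases h : a < b
  · have hn : (b - a).toNat ≠ 0 := by omega
    obtain ⟨k, hk⟩ := Nat.exists_eq_succ_of_ne_zero hn
    clear hn
    induction k generalizing a with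
    | zero =>
      have : b = a + 1 := by omega
      subst this
      simp [PySem.List.pyRange_one_singleton]
    | succ m ihm =>
      rw [PySem.List.pyRange_one_cons h]
      have ha1 : a + 1 < b := by omega
      have := ihm (a + 1) ha1 (by omega)
      rw [PySem.List.pyRange_one_cons ha1] at this ⊢
      rw [List.isChain_cons_cons]
      exact ⟨rfl, this⟩
  · rw [PySem.List.pyRange_one_eq_nil (by omega)]
    simp

theorem pvLast_max (l : List Int) (h : l.Pairwise (· < ·)) (hne : l ≠ []) :
    ∀ m ∈ l, m ≤ l.getLast hne := by
  induction l with
  | nil => simp at hne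
  | cons x rest ih =>
    intro m hm
    cases rest with
    | nil =>
      simp at hm
      simp [hm]
    | cons y ys =>
      rw [List.getLast_cons (by simp)]
      rcases List.mem_cons.1 hm with h1 | h2
      · subst h1
        have hx : m < y := (List.pairwise_cons.1 h).1 y (by simp)
        have := ih (List.pairwise_cons.1 h).2 (by simp) y (by simp)
        omega
      · exact ih (List.pairwise_cons.1 h).2 (by simp) m h2

theorem pvMin_head (x : Int) (rest : List Int) (h : (x :: rest).Pairwise (· < ·)) :
    PySem.List.min? (x :: rest) (fun v => v) = some x := by
  obtain ⟨m, hm⟩ : ∃ m, PySem.List.min? (x :: rest) (fun v => v) = some m := by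
    cases he : PySem.List.min? (x :: rest) (fun v => v) with
    | none => exact absurd ((PySem.List.min?_eq_none_iff _ _).1 he) (List.cons_ne_nil _ _)
    | some m => exact ⟨m, rfl⟩
  have hmem := PySem.List.min?_mem hm
  have hmin := PySem.List.min?_isMin hm x (by simp)
  rcases List.mem_cons.1 hmem with h1 | h2
  · rw [hm, h1]
  · have := (List.pairwise_cons.1 h).1 m h2
    simp at hmin
    omega

theorem pvMax_last (x : Int) (rest : List Int) (h : (x :: rest).Pairwise (· < ·)) :
    PySem.List.max? (x :: rest) (fun v => v) = some ((x :: rest).getLast (by simp)) := by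
  obtain ⟨m, hm⟩ : ∃ m, PySem.List.max? (x :: rest) (fun v => v) = some m := by
    cases he : PySem.List.max? (x :: rest) (fun v => v) with
    | none => exact absurd ((PySem.List.max?_eq_none_iff _ _).1 he) (List.cons_ne_nil _ _)
    | some m => exact ⟨m, rfl⟩
  have hmem := PySem.List.max?_mem hm
  have hmax := PySem.List.max?_isMax hm ((x :: rest).getLast (by simp)) (List.getLast_mem _)
  have hle := pvLast_max _ h (by simp) m hmem
  simp at hmax
  rw [hm]
  congr 1
  omega

theorem pvSorted_self (l : List Int) (h : l.Pairwise (· < ·)) :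
    PySem.List.sorted l (fun x => x) false = l :=
  PySem.List.sorted_eq_of_perm_of_pairwise_lt l l (fun x => x) (List.Perm.refl l) h

theorem pvCheckConsecutive_iff (x : Int) (rest : List Int)
    (h : (x :: rest).Pairwise (· < ·)) :
    pvCheckConsecutive (x :: rest) = true ↔ pvTakeChain x rest = rest := by
  unfold pvCheckConsecutive
  rw [if_neg (by simp), pvMin_head x rest h, pvMax_last x rest h, pvSorted_self _ h, beq_iff_eq]
  rw [pvChainTaken]
  constructor
  · intro he
    rw [he]
    exact pvRange_chain _ _
  · intro hc
    exact pvChain_range x rest hc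

-- ---- find_non_consecutive on strictly increasing lists ----

theorem pvFncLoop_spec (shift : Int) :
    ∀ (ys : List Int) (i : Nat) (p : Int), p = shift + (i : Int) →
      (p :: ys).Pairwise (· < ·) →
      pvFncLoop shift (p :: ys) i =
        (if pvTakeChain p ys = ys then none else some (i + 1 + (pvTakeChain p ys).length)) := by
  intro ys
  induction ys with
  | nil =>
    intro i p hp _
    simp [pvFncLoop, pvTakeChain, hp]
  | cons y ys' ih =>
    intro i p hp hpw
    have hpy : p < y := (List.pairwise_cons.1 hpw).1 y (by simp)
    rw [pvFncLoop, if_neg (by omega : ¬ p - (i : Int) > shift)]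
    by_cases hy : y = p + 1
    · have := ih (i + 1) y (by push_cast; omega) (List.pairwise_cons.1 hpw).2
      rw [this]
      simp only [pvTakeChain, if_pos hy]
      by_cases hc : pvTakeChain y ys' = ys'
      · rw [if_pos hc, if_pos (by rw [hc])]
      · rw [if_neg hc, if_neg (by intro h; exact hc (by injection h))]
        congr 1
        simp
        omega
    · have hge : y ≥ p + 2 := by omega
      rw [pvFncLoop, if_pos (by push_cast; omega : y - (((i + 1) : Nat) : Int) > shift)]
      simp only [pvTakeChain, if_neg hy]
      rw [if_neg (by simp)]
      simp

-- ---- the split loop produces the blocks ----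

theorem pvCsLoop_spec : ∀ (fuel : Nat) (xs : List Int) (acc : List (List Int)),
    xs.Pairwise (· < ·) → xs.length ≤ fuel →
    pvCsLoop fuel xs acc = acc ++ pvBlocks xs := by
  intro fuel
  induction fuel with
  | zero =>
    intro xs acc _ hl
    have : xs = [] := by
      cases xs with
      | nil => rfl
      | cons a b => simp at hl
    subst this
    simp [pvCsLoop, pvBlocks]
  | succ f ih =>
    intro xs acc hpw hl
    cases xs with
    | nil => simp [pvCsLoop, pvCheckConsecutive, pvBlocks]
    | cons x rest =>
      rw [pvCsLoop]
      by_cases hcc : pvCheckConsecutive (x :: rest) = true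
      · rw [if_pos hcc, if_pos (by simp)]
        have htc := (pvCheckConsecutive_iff x rest hpw).1 hcc
        rw [pvBlocks, htc, pvDropChain_nil_of_take_all x rest htc, pvBlocks]
      · rw [if_neg hcc]
        have hfnc : pvFindNonConsecutive (x :: rest) =
            some (1 + (pvTakeChain x rest).length) := by
          have h0 : pvFindNonConsecutive (x :: rest) = pvFncLoop x (x :: rest) 0 := rfl
          rw [h0, pvFncLoop_spec x rest 0 x (by simp) hpw]
          rw [if_neg (fun hc => hcc ((pvCheckConsecutive_iff x rest hpw).2 hc))]
        rw [hfnc]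
        show pvCsLoop f ((x :: rest).drop (1 + (pvTakeChain x rest).length))
            (acc ++ [(x :: rest).take (1 + (pvTakeChain x rest).length)]) = acc ++ pvBlocks (x :: rest)
        rw [pvTake_run x rest, pvDrop_run x rest]
        rw [ih (pvDropChain x rest) (acc ++ [x :: pvTakeChain x rest]) ?pw ?len]
        · rw [pvBlocks]
          simp
        case pw =>
          have hsub : List.Sublist (pvDropChain x rest) (x :: rest) := by
            rw [← pvDrop_run x rest]
            exact List.drop_sublist _ _
          exact hpw.sublist hsub
        case len =>
          have h1 := pvDropChain_length_le x rest
          simp at hl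
          omega

theorem pvNodup_sorted_strict (l : List Int) (hnd : l.Nodup) :
    (PySem.List.sorted l (fun x => x) false).Pairwise (· < ·) := by
  have hperm : (PySem.List.sorted l (fun x => x) false).Perm l := PySem.List.sorted_perm _ _ _
  have hnd' : (PySem.List.sorted l (fun x => x) false).Nodup := hperm.nodup_iff.2 hnd
  have hle : (PySem.List.sorted l (fun x => x) false).Pairwise (· ≤ ·) := by
    have := PySem.List.sorted_pairwise (xs := l) (key := fun x => x)
    simpa using this
  exact (hle.and hnd').imp (fun hab => lt_of_le_of_ne hab.1 hab.2)

theorem pvSplit_eq_blocks (l : List Int) (hnd : l.Nodup) :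
    pvConsecutiveSplit l = pvBlocks (PySem.List.sorted l (fun x => x) false) := by
  unfold pvConsecutiveSplit
  by_cases hl : l = []
  · subst hl
    rw [if_pos rfl]
    rw [(PySem.List.sorted_eq_nil_iff _ _ _).2 rfl, pvBlocks]
  · rw [if_neg hl]
    have hpw := pvNodup_sorted_strict l hnd
    have hne : PySem.List.sorted l (fun x => x) false ≠ [] := by
      intro hc
      exact hl ((PySem.List.sorted_eq_nil_iff _ _ _).1 hc)
    obtain ⟨x, rest, hx⟩ := List.exists_cons_of_ne_nil hne
    rw [hx] at hpw ⊢
    by_cases hcc : pvCheckConsecutive (x :: rest) = true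
    · rw [if_pos hcc]
      have htc := (pvCheckConsecutive_iff x rest hpw).1 hcc
      rw [pvBlocks, htc, pvDropChain_nil_of_take_all x rest htc, pvBlocks]
    · rw [if_neg hcc]
      exact pvCsLoop_spec _ _ _ hpw (by simp)

-- ---- formatting: A's fold over the blocks ----

theorem pvStepA_block (acc : List Char) (y : Int) (r : List Int) :
    (if (y :: pvTakeChain y r).length = 1 then
        acc ++ ' ' :: PySem.Int.toChars (PySem.List.pyGetD (y :: pvTakeChain y r) 0 0)
      else
        acc ++ ' ' :: PySem.Int.toChars (PySem.List.pyGetD (y :: pvTakeChain y r) 0 0)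
          ++ '~' :: PySem.Int.toChars (PySem.List.pyGetD (y :: pvTakeChain y r) (-1) 0))
    = acc ++ ' ' :: pvFmtRun y (pvRunEnd y r) := by
  by_cases h : pvTakeChain y r = []
  · have hre : pvRunEnd y r = y := (pvRunEnd_eq_iff y r).2 h
    simp [h, pvFmtRun, hre, PySem.List.pyGetD_zero_cons]
  · have hlen : ¬ (y :: pvTakeChain y r).length = 1 := by
      cases htc' : pvTakeChain y r with
      | nil => exact absurd htc' h
      | cons a b => simp
    have hne : (y :: pvTakeChain y r) ≠ [] := by simp
    have hgl : (y :: pvTakeChain y r).getLast hne = pvRunEnd y r := by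
      have h1 := pvBlock_getLast? y r
      rw [List.getLast?_eq_getLast hne] at h1
      injection h1
    have hy : ¬ y = pvRunEnd y r := by
      intro hc
      exact h ((pvRunEnd_eq_iff y r).1 hc.symm)
    simp only [if_neg hlen, pvFmtRun, if_neg hy,
      PySem.List.pyGetD_zero_cons, PySem.List.pyGetD_neg_one _ _ hne, hgl]
    simp

theorem pvFoldA_blocks : ∀ (xs : List Int) (acc : List Char),
    (pvBlocks xs).foldl (fun s sl =>
      if List.length sl = 1 then
        s ++ ' ' :: PySem.Int.toChars (PySem.List.pyGetD sl 0 0)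
      else
        s ++ ' ' :: PySem.Int.toChars (PySem.List.pyGetD sl 0 0)
          ++ '~' :: PySem.Int.toChars (PySem.List.pyGetD sl (-1) 0)) acc
    = acc ++ ((pvFmtBlocks xs).map (fun p => ' ' :: p)).flatten := by
  intro xs
  induction xs using pvBlocks.induct with
  | case1 => intro acc; simp [pvBlocks, pvFmtBlocks]
  | case2 x rest ih =>
    intro acc
    rw [pvBlocks, pvFmtBlocks, List.foldl_cons, pvStepA_block acc x rest, ih]
    simp

-- ---- B's single pass produces the formatted runs ----

theorem pvFoldB_spec : ∀ (rest : List Int) (parts : List (List Char)) (s p : Int),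
    (match (rest.foldl pvStepB (parts, some (s, p))).2 with
     | none => (rest.foldl pvStepB (parts, some (s, p))).1
     | some (a, b) => (rest.foldl pvStepB (parts, some (s, p))).1 ++ [pvFmtRun a b])
    = parts ++ pvFmtRun s (pvRunEnd p rest) :: pvFmtBlocks (pvDropChain p rest) := by
  intro rest
  induction rest with
  | nil =>
    intro parts s p
    simp [pvRunEnd, pvDropChain, pvFmtBlocks]
  | cons x r ih =>
    intro parts s p
    rw [List.foldl_cons]
    by_cases hx : x = p + 1
    · have hstep : pvStepB (parts, some (s, p)) x = (parts, some (s, x)) := by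
        simp [pvStepB, hx]
      rw [hstep, ih parts s x]
      simp only [pvRunEnd, pvDropChain, if_pos hx]
    · have hstep : pvStepB (parts, some (s, p)) x = (parts ++ [pvFmtRun s p], some (x, x)) := by
        simp [pvStepB, hx]
      rw [hstep, ih (parts ++ [pvFmtRun s p]) x x]
      simp only [pvRunEnd, pvDropChain, if_neg hx]
      rw [pvFmtBlocks]
      simp

theorem pvDigitChar_nonspace (m : Nat) :
    PySem.Chars.isspace (Nat.digitChar (m % 10)) = false := by
  have h : m % 10 < 10 := Nat.mod_lt m (by norm_num)
  interval_cases h : m % 10 <;> decide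

theorem pvCore_nonspace : ∀ (fuel n : Nat) (ds : List Char),
    (∀ c ∈ ds, PySem.Chars.isspace c = false) →
    ∀ c ∈ Nat.toDigitsCore 10 fuel n ds, PySem.Chars.isspace c = false := by
  intro fuel
  induction fuel with
  | zero => intro n ds hds c hc; exact hds c hc
  | succ f ih =>
    intro n ds hds c hc
    rw [Nat.toDigitsCore] at hc
    by_cases hz : n / 10 = 0
    · rw [if_pos hz] at hc
      rcases List.mem_cons.1 hc with h1 | h2
      · rw [h1]; exact pvDigitChar_nonspace n
      · exact hds c h2
    · rw [if_neg hz] at hc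
      refine ih (n / 10) _ ?_ c hc
      intro d hd
      rcases List.mem_cons.1 hd with h1 | h2
      · rw [h1]; exact pvDigitChar_nonspace n
      · exact hds d h2

theorem pvCore_ne_nil : ∀ (fuel n : Nat) (ds : List Char),
    ds ≠ [] ∨ fuel ≠ 0 → Nat.toDigitsCore 10 fuel n ds ≠ [] := by
  intro fuel
  induction fuel with
  | zero =>
    intro n ds h
    rcases h with h | h
    · simpa [Nat.toDigitsCore] using h
    · exact absurd rfl h
  | succ f ih =>
    intro n ds _
    rw [Nat.toDigitsCore]
    by_cases hz : n / 10 = 0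
    · rw [if_pos hz]; simp
    · rw [if_neg hz]
      exact ih (n / 10) _ (Or.inl (by simp))

theorem pvToChars_ne_nil (n : Int) : PySem.Int.toChars n ≠ [] := by
  unfold PySem.Int.toChars
  split
  · simp
  · exact pvCore_ne_nil _ _ _ (Or.inr (by simp))

theorem pvToChars_nonspace (n : Int) :
    ∀ c ∈ PySem.Int.toChars n, PySem.Chars.isspace c = false := by
  unfold PySem.Int.toChars
  split
  · intro c hc
    rcases List.mem_cons.1 hc with h1 | h2
    · rw [h1]; decide
    · exact pvCore_nonspace _ _ _ (by simp) c h2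
  · exact pvCore_nonspace _ _ _ (by simp)


theorem pvJoin_ne_nil (p : List Char) (ps : List (List Char)) (hp : p ≠ []) :
    PySem.Chars.join [' '] (p :: ps) ≠ [] := by
  cases ps with
  | nil => simpa [PySem.Chars.join_singleton] using hp
  | cons q r =>
    rw [PySem.Chars.join_cons_cons]
    simp [hp]

theorem pvFlatten_sep (p : List Char) (ps : List (List Char)) :
    (((p :: ps).map (fun q => ' ' :: q)).flatten) = ' ' :: PySem.Chars.join [' '] (p :: ps) := by
  induction ps generalizing p with
  | nil => simp [PySem.Chars.join_singleton]
  | cons q r ih =>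
    rw [PySem.Chars.join_cons_cons]
    simp only [List.map_cons, List.flatten_cons] at ih ⊢
    rw [ih q]
    simp

theorem pvJoin_head? (p : List Char) (ps : List (List Char)) (hp : p ≠ []) :
    (PySem.Chars.join [' '] (p :: ps)).head? = p.head? := by
  cases ps with
  | nil => rw [PySem.Chars.join_singleton]
  | cons q r =>
    rw [PySem.Chars.join_cons_cons]
    cases p with
    | nil => exact absurd rfl hp
    | cons a t => simp

theorem pvJoin_getLast? (ps : List (List Char)) (p : List Char)
    (h : ∀ q ∈ p :: ps, q ≠ []) :
    (PySem.Chars.join [' '] (p :: ps)).getLast? = (ps.getLastD p).getLast? := by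
  induction ps generalizing p with
  | nil => rw [PySem.Chars.join_singleton]; rfl
  | cons q r ih =>
    rw [PySem.Chars.join_cons_cons]
    have hq : PySem.Chars.join [' '] (q :: r) ≠ [] :=
      pvJoin_ne_nil q r (h q (by simp))
    rw [List.getLast?_append_of_ne_nil _ hq]
    rw [ih q (fun x hx => h x (List.mem_cons_of_mem _ hx))]
    rw [List.getLastD_cons]

theorem pvStrip_core (J : List Char)
    (hh : ∀ a, J.head? = some a → PySem.Chars.isspace a = false)
    (hl : ∀ a, J.getLast? = some a → PySem.Chars.isspace a = false) :
    PySem.Chars.strip (' ' :: J) = J := by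
  unfold PySem.Chars.strip PySem.Chars.lstrip PySem.Chars.rstrip
  rw [List.dropWhile_cons_of_pos (by decide)]
  have h1 : List.dropWhile PySem.Chars.isspace J = J := by
    rw [List.dropWhile_eq_self_iff]
    intro hlen
    have := hh J[0] (by rw [List.head?_eq_getElem?]; simp [List.getElem?_eq_getElem hlen])
    simp [this]
  rw [h1]
  have h2 : List.dropWhile PySem.Chars.isspace J.reverse = J.reverse := by
    rw [List.dropWhile_eq_self_iff]
    intro hlen
    have hsome : J.reverse.head? = some (J.reverse[0]) := by
      rw [List.head?_eq_getElem?]; simp [List.getElem?_eq_getElem hlen]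
    have hgl : J.getLast? = some (J.reverse[0]) := by
      rw [← List.head?_reverse]; exact hsome
    have := hl _ hgl
    simpa using this
  rw [h2, List.reverse_reverse]

theorem pvStrip_join (parts : List (List Char))
    (hne : ∀ p ∈ parts, p ≠ [])
    (hsp : ∀ p ∈ parts, ∀ c ∈ p, PySem.Chars.isspace c = false) :
    PySem.Chars.strip ((parts.map (fun p => ' ' :: p)).flatten)
      = PySem.Chars.join [' '] parts := by
  cases parts with
  | nil => decide
  | cons p ps =>
    rw [pvFlatten_sep]
    refine pvStrip_core _ ?_ ?_
    · intro a ha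
      rw [pvJoin_head? p ps (hne p (by simp))] at ha
      exact hsp p (by simp) a (List.mem_of_mem_head? ha)
    · intro a ha
      rw [pvJoin_getLast? ps p hne] at ha
      have hmem : ps.getLastD p ∈ p :: ps := List.getLastD_mem_cons
      exact hsp _ hmem a (List.mem_of_mem_getLast? ha)

theorem pvFmtRun_ne_nil (s e : Int) : pvFmtRun s e ≠ [] := by
  unfold pvFmtRun
  split
  · exact pvToChars_ne_nil s
  · intro hc
    exact pvToChars_ne_nil s (List.append_eq_nil_iff.1 hc).1

theorem pvFmtRun_nonspace (s e : Int) :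
    ∀ c ∈ pvFmtRun s e, PySem.Chars.isspace c = false := by
  unfold pvFmtRun
  split
  · exact pvToChars_nonspace s
  · intro c hc
    rcases List.mem_append.1 hc with h1 | h2
    · exact pvToChars_nonspace s c h1
    · rcases List.mem_cons.1 h2 with h3 | h4
      · rw [h3]; decide
      · exact pvToChars_nonspace e c h4

theorem pvFmtBlocks_shape (xs : List Int) :
    ∀ q ∈ pvFmtBlocks xs, ∃ s e, q = pvFmtRun s e := by
  induction xs using pvFmtBlocks.induct with
  | case1 => simp [pvFmtBlocks]
  | case2 x rest ih =>
    intro q hq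
    rw [pvFmtBlocks] at hq
    rcases List.mem_cons.1 hq with h1 | h2
    · exact ⟨x, pvRunEnd x rest, h1⟩
    · exact ih q h2

theorem pvA_eq_join (l : List Int) (hnd : l.Nodup) :
    proper_str_list_of_ints l =
      String.mk (PySem.Chars.join [' ']
        (pvFmtBlocks (PySem.List.sorted l (fun x => x) false))) := by
  unfold proper_str_list_of_ints
  dsimp only
  rw [pvSplit_eq_blocks l hnd, pvFoldA_blocks]
  congr 1
  rw [List.nil_append]
  refine pvStrip_join _ ?_ ?_
  · intro p hp
    obtain ⟨s, e, hse⟩ := pvFmtBlocks_shape _ p hp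
    rw [hse]; exact pvFmtRun_ne_nil s e
  · intro p hp
    obtain ⟨s, e, hse⟩ := pvFmtBlocks_shape _ p hp
    rw [hse]; exact pvFmtRun_nonspace s e

theorem pvB_eq_join (l : List Int) :
    proper_str_list_of_ints_alt l =
      String.mk (PySem.Chars.join [' ']
        (pvFmtBlocks (PySem.List.sorted l (fun x => x) false))) := by
  unfold proper_str_list_of_ints_alt
  dsimp only
  cases hx : PySem.List.sorted l (fun x => x) false with
  | nil => rw [pvFmtBlocks]; rfl
  | cons x rest =>
    congr 1
    rw [List.foldl_cons]
    have hstep : pvStepB ([], none) x = ([], some (x, x)) := rfl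
    rw [hstep]
    have := pvFoldB_spec rest [] x x
    rw [pvFmtBlocks]
    simp only [List.nil_append] at this
    exact congrArg (PySem.Chars.join [' ']) this

-- ===== VERDICT (by name: the statement is the Claim_ definition above) =====
theorem proper_str_list_of_ints_spec : Claim_equal_proper_str_list_of_ints := by
  intro l _ hnd
  unfold Spec_proper_str_list_of_ints
  rw [pvA_eq_join l hnd, pvB_eq_join l]
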